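-- pv_equiv track=rewrite | github.com/axelcool1234/.dotfiles | pkgs/lean-highlighter/highlighter.py | _bridge_unstyled_whitespace
-- ===== SOURCE A (Python) =====
-- def _bridge_unstyled_whitespace(text, styles):
--     """
--     Extend style across unstyled whitespace-only gaps to reduce reset/reapply
--     churn. If both sides are styled, prefer the left style so color-to-color
--     transitions happen directly at the next token.
--     """
--     bridged = list(styles)
--     n = len(bridged)
--     i = 0
--
--     while i < n:
--         if bridged[i] is not None:
--             i += 1
--             continue
--
--         j = i
--         while j < n and bridged[j] is None:
--             j += 1
--
--         if j > i and text[i:j].isspace():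
--             left = bridged[i - 1] if i > 0 else None
--             right = bridged[j] if j < n else None
--
--             # Bridge only when there is a styled token on the left and another
--             # styled token on the right; this keeps resets for real returns to
--             # default text while minimizing style ping-pong between tokens.
--             if left is not None and right is not None:
--                 for k in range(i, j):
--                     bridged[k] = left
--
--         i = j
--
--     return bridged
-- ===== SOURCE B (Python) =====
-- def _bridge_unstyled_whitespace(text, styles):
--     """
--     Extend style across unstyled whitespace-only gaps to reduce reset/reapply
--     churn, preferring the left style; anchor-pair formulation.
--     """
--     bridged = list(styles)
--     anchors = [i for i, s in enumerate(bridged) if s is not None]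
--     for p, q in zip(anchors, anchors[1:]):
--         if q > p + 1 and text[p + 1:q].isspace():
--             left = bridged[p]
--             for k in range(p + 1, q):
--                 bridged[k] = left
--     return bridged
-- ===== Notes on version B (the rewrite author's own statement) =====
-- stated objective: simpler
-- what changed: Replaces A's stateful scan-and-advance while-loop (manual gap detection with index jumps and left/right sentinel checks) by first collecting the styled positions into an anchor index list and then filling whitespace-only gaps between consecutive anchor pairs, which makes the left/right-styled requirement structural.
import Mathlib
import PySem

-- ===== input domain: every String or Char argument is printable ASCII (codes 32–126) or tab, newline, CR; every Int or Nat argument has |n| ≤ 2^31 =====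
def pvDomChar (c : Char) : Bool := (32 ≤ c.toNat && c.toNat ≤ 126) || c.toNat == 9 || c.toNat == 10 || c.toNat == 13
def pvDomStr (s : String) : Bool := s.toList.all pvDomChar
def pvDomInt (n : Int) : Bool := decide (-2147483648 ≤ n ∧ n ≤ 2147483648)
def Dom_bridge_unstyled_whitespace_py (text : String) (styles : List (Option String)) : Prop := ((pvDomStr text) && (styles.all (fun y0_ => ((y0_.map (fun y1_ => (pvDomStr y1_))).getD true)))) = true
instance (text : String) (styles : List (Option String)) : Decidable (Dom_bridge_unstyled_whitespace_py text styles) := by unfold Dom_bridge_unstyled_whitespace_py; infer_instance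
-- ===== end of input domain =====

-- B replaces A's scan-and-advance while-loop by collecting styled anchor positions and
-- filling whitespace-only gaps between consecutive anchor pairs (objective: simpler).

-- ===== PORT A =====
-- shared inner write loop: 'for k in range(a, c): bridged[k] = v'
def pvFill (b : List (Option String)) (a c : Int) (v : Option String) : List (Option String) :=
  (PySem.List.pyRange a c 1).foldl (fun acc k => PySem.List.pySetD acc k v) b

-- A's inner while: 'while j < n and bridged[j] is None: j += 1'
def pvScanJ (b : List (Option String)) (n j : Nat) : Nat :=
  if _h : j < n then
    if PySem.List.pyGetD b (j : Int) none = none then pvScanJ b n (j + 1) else j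
  else j
termination_by n - j

-- cited by pvLoopA's decreasing_by (the port needs it for termination)
theorem pvScanJ_ge (b : List (Option String)) (n j : Nat) : j ≤ pvScanJ b n j := by
  induction j using pvScanJ.induct (b := b) (n := n) with
  | case1 j h hb ih => rw [pvScanJ]; simp only [h, hb, dif_pos, if_pos]; omega
  | case2 j h hb => simp only [PySem.List.pyGetD_natCast, List.getD_eq_getElem?_getD] at hb; rw [pvScanJ]; simp [h, hb]
  | case3 j h => rw [pvScanJ]; simp [h]

theorem pvScanJ_gt (b : List (Option String)) (n j : Nat) (hj : j < n)
    (hb : PySem.List.pyGetD b (j : Int) none = none) : j < pvScanJ b n j := by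
  rw [pvScanJ]; simp only [hj, hb, dif_pos, if_pos]
  have := pvScanJ_ge b n (j + 1); omega

-- A's outer while loop over i
def pvLoopA (text : String) (n : Nat) (b : List (Option String)) (i : Nat) : List (Option String) :=
  if hi : i < n then
    if PySem.List.pyGetD b (i : Int) none ≠ none then pvLoopA text n b (i + 1)
    else
      let j := pvScanJ b n i
      let b' :=
        if j > i ∧ PySem.Str.strIsspace (PySem.Str.slice text (some (i : Int)) (some (j : Int))) = true then
          let left := if 0 < i then PySem.List.pyGetD b ((i : Int) - 1) none else none
          let right := if j < n then PySem.List.pyGetD b (j : Int) none else none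
          if left ≠ none ∧ right ≠ none then pvFill b (i : Int) (j : Int) left else b
        else b
      pvLoopA text n b' j
  else b
termination_by n - i
decreasing_by
  · omega
  · have := pvScanJ_gt b n i hi (by simpa using ‹¬PySem.List.pyGetD b (i : Int) none ≠ none›)
    omega

def bridge_unstyled_whitespace_py (text : String) (styles : List (Option String)) : List (Option String) :=
  pvLoopA text styles.length styles 0

-- ===== PORT B =====
def bridge_unstyled_whitespace_py_alt (text : String) (styles : List (Option String)) : List (Option String) :=
  let bridged := styles
  let anchors := ((PySem.List.enumerate bridged 0).filter (fun pr => pr.2.isSome)).map (·.1)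
  (List.zip anchors (PySem.List.slice anchors (some 1) none)).foldl
    (fun b pq =>
      if pq.2 > pq.1 + 1 ∧ PySem.Str.strIsspace (PySem.Str.slice text (some (pq.1 + 1)) (some pq.2)) = true then
        let left := PySem.List.pyGetD b pq.1 none
        pvFill b (pq.1 + 1) pq.2 left
      else b) bridged

-- ===== PRECONDITION & SPEC =====
def Spec_bridge_unstyled_whitespace_py (text : String) (styles : List (Option String)) (out : List (Option String)) : Prop := out = bridge_unstyled_whitespace_py_alt text styles
instance (text : String) (styles : List (Option String)) (out : List (Option String)) : Decidable (Spec_bridge_unstyled_whitespace_py text styles out) := by unfold Spec_bridge_unstyled_whitespace_py; infer_instance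

-- ===== CLAIM (what is proved, stated in full; the proofs are below) =====
def Claim_equal_bridge_unstyled_whitespace_py : Prop := ∀ (text : String) (styles : List (Option String)), Dom_bridge_unstyled_whitespace_py text styles → Spec_bridge_unstyled_whitespace_py text styles (bridge_unstyled_whitespace_py text styles)

-- ===== LEMMAS AND PROOFS =====

-- greatest styled index below k
def pvPrevA (st : List (Option String)) : Nat → Option Nat
  | 0 => none
  | (m + 1) => if st.getD m none ≠ none then some m else pvPrevA st m

-- the common characterisation both ports are proved equal to
def pvSpecAt (text : String) (st : List (Option String)) (k : Nat) : Option String :=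
  match st.getD k none with
  | some s => some s
  | none =>
    match pvPrevA st k with
    | none => none
    | some p =>
      let j := pvScanJ st st.length k
      if j < st.length ∧ PySem.Str.strIsspace (PySem.Str.slice text (some ((p : Int) + 1)) (some (j : Int))) = true
      then st.getD p none else none

def pvSpecOut (text : String) (st : List (Option String)) : List (Option String) :=
  (List.range st.length).map (pvSpecAt text st)

-- ---- pvScanJ facts ----
theorem pvScanJ_le (b : List (Option String)) (n j : Nat) (h : j ≤ n) : pvScanJ b n j ≤ n := by
  revert h
  induction j using pvScanJ.induct (b := b) (n := n) with
  | case1 j h1 hb ih => intro _; rw [pvScanJ]; simp only [h1, hb, dif_pos, if_pos]; exact ih (by omega)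
  | case2 j h1 hb => intro _; simp only [PySem.List.pyGetD_natCast, List.getD_eq_getElem?_getD] at hb; rw [pvScanJ]; simp [h1, hb]; omega
  | case3 j h1 => intro _; rw [pvScanJ]; simp [h1]; omega

theorem pvScanJ_none (b : List (Option String)) (n j : Nat) :
    ∀ m, j ≤ m → m < pvScanJ b n j → b.getD m none = none := by
  induction j using pvScanJ.induct (b := b) (n := n) with
  | case1 j h1 hb ih =>
      intro m hm1 hm2
      rcases Nat.eq_or_lt_of_le hm1 with rfl | hlt
      · simpa using hb
      · rw [pvScanJ] at hm2; simp only [h1, hb, dif_pos, if_pos] at hm2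
        exact ih m hlt hm2
  | case2 j h1 hb => intro m hm1 hm2; simp only [PySem.List.pyGetD_natCast, List.getD_eq_getElem?_getD] at hb; rw [pvScanJ] at hm2; simp [h1, hb] at hm2; omega
  | case3 j h1 => intro m hm1 hm2; rw [pvScanJ] at hm2; simp [h1] at hm2; omega

theorem pvScanJ_styled (b : List (Option String)) (n j : Nat) (h : pvScanJ b n j < n) :
    b.getD (pvScanJ b n j) none ≠ none := by
  revert h
  induction j using pvScanJ.induct (b := b) (n := n) with
  | case1 j h1 hb ih =>
      intro h
      rw [pvScanJ] at h ⊢; simp only [h1, hb, dif_pos, if_pos] at h ⊢; exact ih h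
  | case2 j h1 hb =>
      intro h
      have hbg : ¬ (b[j]?.getD none = none) := by
        simpa [List.getD_eq_getElem?_getD] using hb
      have hsc : pvScanJ b n j = j := by rw [pvScanJ]; simp [h1, hbg]
      rw [hsc]
      simpa [List.getD_eq_getElem?_getD] using hbg
  | case3 j h1 => intro h; rw [pvScanJ] at h; simp [h1] at h

theorem pvScanJ_congr (b b' : List (Option String)) (n j : Nat)
    (h : ∀ m, j ≤ m → b.getD m none = b'.getD m none) : pvScanJ b n j = pvScanJ b' n j := by
  revert h
  induction j using pvScanJ.induct (b := b) (n := n) with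
  | case1 j h1 hb ih =>
      intro h
      conv_lhs => rw [pvScanJ]
      conv_rhs => rw [pvScanJ]
      have hb' : PySem.List.pyGetD b' (j : Int) none = none := by
        simp only [PySem.List.pyGetD_natCast] at hb ⊢; rw [← h j le_rfl]; exact hb
      simp only [h1, hb, hb', dif_pos, if_pos]
      exact ih (fun m hm => h m (by omega))
  | case2 j h1 hb =>
      intro h
      conv_lhs => rw [pvScanJ]
      conv_rhs => rw [pvScanJ]
      have hb' : ¬ PySem.List.pyGetD b' (j : Int) none = none := by
        simp only [PySem.List.pyGetD_natCast] at hb ⊢; rw [← h j le_rfl]; exact hb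
      have hbg : ¬ (b[j]?.getD none = none) := by simpa [List.getD_eq_getElem?_getD] using hb
      have hbg' : ¬ (b'[j]?.getD none = none) := by simpa [List.getD_eq_getElem?_getD] using hb'
      simp [h1, hbg, hbg']
  | case3 j h1 =>
      intro _
      conv_lhs => rw [pvScanJ]
      conv_rhs => rw [pvScanJ]
      simp [h1]

-- ---- pvPrevA facts ----
theorem pvPrevA_gap (st : List (Option String)) (i k : Nat) (h1 : i ≤ k)
    (hgap : ∀ m, i ≤ m → m < k → st.getD m none = none) : pvPrevA st k = pvPrevA st i := by
  induction k with
  | zero => have : i = 0 := by omega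
            subst this; rfl
  | succ m ih =>
      rcases Nat.eq_or_lt_of_le h1 with rfl | hlt
      · rfl
      · have hm : st.getD m none = none := hgap m (by omega) (by omega)
        rw [pvPrevA]; simp only [hm, ne_eq, not_true_eq_false, if_false]
        · exact ih (by omega) (fun m' h1' h2' => hgap m' h1' (by omega))

theorem pvPrevA_none (st : List (Option String)) (k : Nat)
    (h : ∀ m, m < k → st.getD m none = none) : pvPrevA st k = none := by
  induction k with
  | zero => rfl
  | succ m ih =>
      rw [pvPrevA]; simp only [h m (by omega), ne_eq, not_true_eq_false, if_false]
      exact ih (fun m' hm' => h m' (by omega))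

theorem pvPrevA_adj (st : List (Option String)) (m : Nat) (h : st.getD m none ≠ none) :
    pvPrevA st (m + 1) = some m := by
  rw [pvPrevA, if_pos h]

-- ---- pvFill facts ----
theorem length_foldl_pySetD (v : Option String) (ks : List Int) (b : List (Option String)) :
    (ks.foldl (fun acc k => PySem.List.pySetD acc k v) b).length = b.length := by
  induction ks generalizing b with
  | nil => rfl
  | cons k ks ih => simp [List.foldl_cons, ih, PySem.List.length_pySetD]

theorem length_pvFill (b : List (Option String)) (a c : Int) (v : Option String) :
    (pvFill b a c v).length = b.length := length_foldl_pySetD v _ b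

theorem getD_pvFill (b : List (Option String)) (i j : Nat) (v : Option String)
    (hj : j ≤ b.length) (k : Nat) :
    (pvFill b (i : Int) (j : Int) v).getD k none
      = if i ≤ k ∧ k < j then v else b.getD k none := by
  induction hd : j - i generalizing i b with
  | zero =>
      have hij : j ≤ i := by omega
      have hnil : PySem.List.pyRange (i : Int) (j : Int) 1 = [] :=
        PySem.List.pyRange_one_eq_nil (by exact_mod_cast hij)
      rw [pvFill, hnil]
      simp only [List.foldl_nil]
      rw [if_neg (by omega)]
  | succ d ih =>
      have hij : i < j := by omega
      have hcons : PySem.List.pyRange (i : Int) (j : Int) 1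
          = (i : Int) :: PySem.List.pyRange ((i : Int) + 1) (j : Int) 1 :=
        PySem.List.pyRange_one_cons (by exact_mod_cast hij)
      rw [pvFill, hcons]
      simp only [List.foldl_cons]
      have hset : PySem.List.pySetD b (i : Int) v = b.set i v := PySem.List.pySetD_natCast b i v
      have hcast : ((i : Int) + 1) = ((i + 1 : Nat) : Int) := by push_cast; ring
      rw [hset, hcast]
      have hlen : j ≤ (b.set i v).length := by simpa using hj
      have := ih (i := i + 1) (b := b.set i v) hlen (by omega)
      rw [pvFill] at this
      rw [this]
      by_cases hk : i ≤ k ∧ k < j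
      · rw [if_pos hk]
        by_cases hk1 : i + 1 ≤ k
        · rw [if_pos ⟨hk1, hk.2⟩]
        · have : k = i := by omega
          subst this
          rw [if_neg (by omega)]
          rw [List.getD_eq_getElem?_getD, List.getElem?_set_self (by omega)]
          rfl
      · rw [if_neg hk, if_neg (by omega)]
        have hne : i ≠ k := by omega
        rw [List.getD_eq_getElem?_getD, List.getElem?_set_ne hne, ← List.getD_eq_getElem?_getD]

theorem pvScanJ_exact (b : List (Option String)) (n k q : Nat) (hkq : k ≤ q) (hq : q ≤ n)
    (hgap : ∀ m, k ≤ m → m < q → b.getD m none = none)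
    (hqs : q < n → b.getD q none ≠ none) : pvScanJ b n k = q := by
  induction hd : q - k generalizing k with
  | zero =>
      have : k = q := by omega
      subst this
      by_cases hkn : k < n
      · have hst := hqs hkn
        have hng : ¬ (b[k]?.getD none = none) := by
          simpa [List.getD_eq_getElem?_getD] using hst
        rw [pvScanJ]
        simp [hkn, hng]
      · rw [pvScanJ]; simp [hkn]
  | succ d ih =>
      have hlt : k < q := by omega
      have hkn : k < n := by omega
      have hknone : b.getD k none = none := hgap k le_rfl hlt
      rw [pvScanJ]
      have hg : PySem.List.pyGetD b (k : Int) none = none := by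
        simpa [List.getD_eq_getElem?_getD] using hknone
      simp only [hkn, hg, dif_pos, if_pos]
      exact ih (k + 1) (by omega) (fun m h1 h2 => hgap m (by omega) h2) (by omega)

-- ---- pvSpecAt facts ----
theorem pvSpecAt_styled (text : String) (st : List (Option String)) (k : Nat)
    (h : st.getD k none ≠ none) : pvSpecAt text st k = st.getD k none := by
  rcases ho : st.getD k none with _ | s
  · exact absurd ho h
  · rw [pvSpecAt]; rw [ho]

theorem pvSpecAt_no_prev (text : String) (st : List (Option String)) (k : Nat)
    (hk : st.getD k none = none) (h : ∀ m, m < k → st.getD m none = none) :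
    pvSpecAt text st k = none := by
  rw [pvSpecAt, hk, pvPrevA_none st k h]

theorem pvSpecAt_gap (text : String) (st : List (Option String)) (p q k : Nat)
    (hp : st.getD p none ≠ none) (hq : q ≤ st.length)
    (hpk : p < k) (hkq : k < q)
    (hgap : ∀ m, p < m → m < q → st.getD m none = none)
    (hqs : q < st.length → st.getD q none ≠ none) :
    pvSpecAt text st k
      = if q < st.length ∧ PySem.Str.strIsspace (PySem.Str.slice text (some ((p : Int) + 1)) (some (q : Int))) = true
        then st.getD p none else none := by
  have hk : st.getD k none = none := hgap k hpk hkq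
  have hprev : pvPrevA st k = some p := by
    have h1 : pvPrevA st k = pvPrevA st (p + 1) :=
      pvPrevA_gap st (p + 1) k hpk (fun m h1 h2 => hgap m (by omega) (by omega))
    rw [h1, pvPrevA_adj st p hp]
  have hscan : pvScanJ st st.length k = q :=
    pvScanJ_exact st st.length k q (by omega) hq
      (fun m h1 h2 => hgap m (by omega) h2) hqs
  rw [pvSpecAt, hk, hprev]
  simp only [hscan]

theorem eq_specOut_of_getD (text : String) (st b : List (Option String))
    (hlen : b.length = st.length)
    (h : ∀ k, k < st.length → b.getD k none = pvSpecAt text st k) :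
    b = pvSpecOut text st := by
  apply List.ext_getElem
  · simp [pvSpecOut, hlen]
  · intro k h1 h2
    have hk : k < st.length := by simpa [hlen] using h1
    have hb : b.getD k none = b[k] := by
      rw [List.getD_eq_getElem?_getD, List.getElem?_eq_getElem h1]; rfl
    have := h k hk
    rw [hb] at this
    simpa [pvSpecOut] using this

-- ---- the A loop computes pvSpecOut ----
theorem loopA_to_spec (text : String) (st : List (Option String)) :
    ∀ fuel i b, st.length - i ≤ fuel →
      b.length = st.length →
      (∀ k, i ≤ k → b.getD k none = st.getD k none) →
      (∀ k, k < i → b.getD k none = pvSpecAt text st k) →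
      (0 < i → i < st.length → st.getD i none = none → st.getD (i - 1) none ≠ none) →
      pvLoopA text st.length b i = pvSpecOut text st := by
  intro fuel
  induction fuel with
  | zero =>
      intro i b hf hlen H1 H0 H2
      have hni : ¬ i < st.length := by omega
      rw [pvLoopA]
      simp only [hni]
      exact eq_specOut_of_getD text st b hlen (fun k hk => H0 k (by omega))
  | succ fuel ih =>
      intro i b hf hlen H1 H0 H2
      by_cases hi : i < st.length
      · rw [pvLoopA]
        simp only [hi, dif_pos]
        by_cases hbi : PySem.List.pyGetD b (i : Int) none = none
        · -- unstyled at i: gap processing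
          rw [if_neg (not_not_intro hbi)]
          have hbST : b.getD i none = none := by
            simpa [List.getD_eq_getElem?_getD] using hbi
          have stinone : st.getD i none = none := by rw [← H1 i le_rfl]; exact hbST
          have hjeq : pvScanJ b st.length i = pvScanJ st st.length i :=
            pvScanJ_congr b st st.length i (fun m hm => H1 m hm)
          simp only [hjeq]
          set j := pvScanJ st st.length i with hjdef
          have hij : i < j := by
            have := pvScanJ_gt b st.length i hi hbi
            omega
          have hjn : j ≤ st.length := pvScanJ_le st st.length i (by omega)
          have hgap : ∀ m, i ≤ m → m < j → st.getD m none = none :=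
            fun m h1 h2 => pvScanJ_none st st.length i m h1 h2
          have hstyj : j < st.length → st.getD j none ≠ none :=
            fun h => pvScanJ_styled st st.length i h
          have H2' : 0 < j → j < st.length → st.getD j none = none → st.getD (j - 1) none ≠ none :=
            fun _ h1 h2 => absurd h2 (hstyj h1)
          have happly : ∀ b'' : List (Option String), b''.length = st.length →
              (∀ k, j ≤ k → b''.getD k none = st.getD k none) →
              (∀ k, k < j → b''.getD k none = pvSpecAt text st k) →
              pvLoopA text st.length b'' j = pvSpecOut text st :=
            fun b'' hl h1 h0 => ih j b'' (by omega) hl h1 h0 H2'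
          by_cases hsp : PySem.Str.strIsspace (PySem.Str.slice text (some (i : Int)) (some (j : Int))) = true
          · rw [if_pos ⟨hij, hsp⟩]
            by_cases h0i : 0 < i
            · -- left is styled
              have hleftadj : st.getD (i - 1) none ≠ none := H2 h0i hi stinone
              have hlefteq : (if 0 < i then PySem.List.pyGetD b ((i : Int) - 1) none else none)
                  = st.getD (i - 1) none := by
                rw [if_pos h0i]
                have hc : ((i : Int) - 1) = ((i - 1 : Nat) : Int) := by omega
                rw [hc, PySem.List.pyGetD_natCast]
                rw [H0 (i - 1) (by omega), pvSpecAt_styled text st (i - 1) hleftadj]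
              rw [hlefteq]
              by_cases hjlt : j < st.length
              · -- bridge: fill the gap
                have hrighteq : (if j < st.length then PySem.List.pyGetD b (j : Int) none else none)
                    = st.getD j none := by
                  rw [if_pos hjlt, PySem.List.pyGetD_natCast]
                  exact H1 j (by omega)
                rw [hrighteq]
                rw [if_pos ⟨hleftadj, hstyj hjlt⟩]
                apply happly
                · rw [length_pvFill]; exact hlen
                · intro k hk
                  rw [getD_pvFill b i j _ (by omega) k, if_neg (by omega)]
                  exact H1 k (by omega)
                · intro k hk
                  rw [getD_pvFill b i j _ (by omega) k]
                  by_cases hki : i ≤ k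
                  · rw [if_pos ⟨hki, hk⟩]
                    have := pvSpecAt_gap text st (i - 1) j k hleftadj hjn (by omega) hk
                      (fun m h1 h2 => hgap m (by omega) h2) hstyj
                    have hc : (((i - 1 : Nat) : Int) + 1) = (i : Int) := by omega
                    rw [hc] at this
                    rw [this, if_pos ⟨hjlt, hsp⟩]
                  · rw [if_neg (by omega)]
                    exact H0 k (by omega)
              · -- no styled token on the right: leave the gap
                have hrighteq : (if j < st.length then PySem.List.pyGetD b (j : Int) none else none)
                    = none := by rw [if_neg hjlt]
                rw [hrighteq]
                rw [if_neg (by simp)]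
                apply happly b hlen (fun k hk => H1 k (by omega))
                intro k hk
                by_cases hki : i ≤ k
                · have := pvSpecAt_gap text st (i - 1) j k hleftadj hjn (by omega) hk
                    (fun m h1 h2 => hgap m (by omega) h2) hstyj
                  have hc : (((i - 1 : Nat) : Int) + 1) = (i : Int) := by omega
                  rw [hc] at this
                  rw [this, if_neg (by tauto)]
                  rw [H1 k (by omega)]
                  exact hgap k hki hk
                · exact H0 k (by omega)
            · -- i = 0: no styled token on the left
              have hlefteq : (if 0 < i then PySem.List.pyGetD b ((i : Int) - 1) none else none)
                  = none := by rw [if_neg h0i]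
              rw [hlefteq]
              rw [if_neg (by simp)]
              apply happly b hlen (fun k hk => H1 k (by omega))
              intro k hk
              by_cases hki : i ≤ k
              · rw [H1 k (by omega), hgap k hki hk]
                rw [pvSpecAt_no_prev text st k (hgap k hki hk)
                  (fun m hm => hgap m (by omega) (by omega))]
              · exact H0 k (by omega)
          · -- gap is not whitespace-only: leave it
            rw [if_neg (by tauto)]
            apply happly b hlen (fun k hk => H1 k (by omega))
            intro k hk
            by_cases hki : i ≤ k
            · rw [H1 k (by omega), hgap k hki hk]
              by_cases h0i : 0 < i
              · have hleftadj : st.getD (i - 1) none ≠ none := H2 h0i hi stinone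
                have := pvSpecAt_gap text st (i - 1) j k hleftadj hjn (by omega) hk
                  (fun m h1 h2 => hgap m (by omega) h2) hstyj
                have hc : (((i - 1 : Nat) : Int) + 1) = (i : Int) := by omega
                rw [hc] at this
                rw [this, if_neg (by tauto)]
              · rw [pvSpecAt_no_prev text st k (hgap k hki hk)
                  (fun m hm => hgap m (by omega) (by omega))]
            · exact H0 k (by omega)
        · -- styled at i: step forward
          rw [if_pos hbi]
          have hst : st.getD i none ≠ none := by
            rw [← H1 i le_rfl]
            simpa [List.getD_eq_getElem?_getD] using hbi
          apply ih (i + 1) b (by omega) hlen (fun k hk => H1 k (by omega))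
          · intro k hk
            rcases Nat.lt_succ_iff_lt_or_eq.mp hk with h | rfl
            · exact H0 k h
            · rw [H1 k le_rfl, pvSpecAt_styled text st k hst]
          · intro _ _ hnone
            have : i + 1 - 1 = i := by omega
            rw [this]
            exact hst
      · rw [pvLoopA]
        simp only [hi]
        exact eq_specOut_of_getD text st b hlen (fun k hk => H0 k (by omega))

theorem pvSpecAt_no_next (text : String) (st : List (Option String)) (k : Nat)
    (hk : st.getD k none = none)
    (h : ∀ m, k ≤ m → m < st.length → st.getD m none = none) :
    pvSpecAt text st k = none := by
  have hscan : ¬ pvScanJ st st.length k < st.length := by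
    by_cases hkn : k < st.length
    · rw [pvScanJ_exact st st.length k st.length (by omega) le_rfl
        (fun m h1 h2 => h m h1 h2) (by omega)]
      omega
    · have := pvScanJ_ge st st.length k
      omega
  rw [pvSpecAt, hk]
  rcases hp : pvPrevA st k with _ | p
  · rfl
  · simp only []
    rw [if_neg (by tauto)]

-- ---- the B fold computes pvSpecOut ----
theorem foldB_to_spec (text : String) (st : List (Option String)) :
    ∀ (rest : List Nat) (a : Nat) b,
      (a :: rest).Pairwise (· < ·) →
      (∀ m ∈ a :: rest, m < st.length ∧ st.getD m none ≠ none) →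
      (∀ m, a ≤ m → m < st.length → st.getD m none ≠ none → m ∈ a :: rest) →
      b.length = st.length →
      (∀ k, k ≤ a → b.getD k none = pvSpecAt text st k) →
      (∀ k, a < k → b.getD k none = st.getD k none) →
      ((a :: rest).zip rest).foldl
        (fun b pq =>
          if ((pq.2 : Int) > (pq.1 : Int) + 1 ∧ PySem.Str.strIsspace (PySem.Str.slice text (some ((pq.1 : Int) + 1)) (some (pq.2 : Int))) = true) then
            pvFill b ((pq.1 : Int) + 1) (pq.2 : Int) (PySem.List.pyGetD b (pq.1 : Int) none)
          else b) b
        = pvSpecOut text st := by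
  intro rest
  induction rest with
  | nil =>
      intro a b hpair hmemf hmemb hlen H0 H1
      simp only [List.zip_nil_right, List.foldl_nil]
      apply eq_specOut_of_getD text st b hlen
      intro k hk
      by_cases hka : k ≤ a
      · exact H0 k hka
      · rw [H1 k (by omega)]
        by_cases hsty : st.getD k none = none
        · rw [hsty, pvSpecAt_no_next text st k hsty]
          intro m hm1 hm2
          by_contra hms
          have : m ∈ [a] := hmemb m (by omega) hm2 hms
          simp at this
          omega
        · rw [pvSpecAt_styled text st k hsty]
  | cons q rest' ih =>
      intro a b hpair hmemf hmemb hlen H0 H1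
      have haq : a < q := (List.pairwise_cons.mp hpair).1 q (by simp)
      have hamem := hmemf a (by simp)
      have hqmem := hmemf q (by simp)
      have hgapm : ∀ m, a < m → m < q → st.getD m none = none := by
        intro m h1 h2
        by_contra hms
        have hmn : m < st.length := by omega
        have : m ∈ a :: q :: rest' := hmemb m (by omega) hmn hms
        rcases this with _ | ⟨_, h⟩
        · omega
        · rcases List.mem_cons.mp h with rfl | hmr
          · omega
          · have := (List.pairwise_cons.mp (List.pairwise_cons.mp hpair).2).1 m hmr
            omega
      -- value written into the gap
      have hleft : PySem.List.pyGetD b (a : Int) none = st.getD a none := by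
        rw [PySem.List.pyGetD_natCast, H0 a le_rfl, pvSpecAt_styled text st a hamem.2]
      simp only [List.zip_cons_cons, List.foldl_cons]
      have hcast : ((a : Int) + 1) = ((a + 1 : Nat) : Int) := by push_cast; ring
      have hpair' : (q :: rest').Pairwise (· < ·) := (List.pairwise_cons.mp hpair).2
      have hmemf' : ∀ m ∈ q :: rest', m < st.length ∧ st.getD m none ≠ none :=
        fun m hm => hmemf m (List.mem_cons_of_mem a hm)
      have hmemb' : ∀ m, q ≤ m → m < st.length → st.getD m none ≠ none → m ∈ q :: rest' := by
        intro m h1 h2 h3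
        have := hmemb m (by omega) h2 h3
        rcases List.mem_cons.mp this with rfl | hmr
        · omega
        · exact hmr
      have hspecgap : ∀ k, a < k → k < q →
          pvSpecAt text st k = if q < st.length ∧
            PySem.Str.strIsspace (PySem.Str.slice text (some ((a : Int) + 1)) (some (q : Int))) = true
            then st.getD a none else none :=
        fun k h1 h2 => pvSpecAt_gap text st a q k hamem.2 (by omega) h1 h2 hgapm
          (fun _ => hqmem.2)
      by_cases hcond : ((q : Int) > (a : Int) + 1 ∧
          PySem.Str.strIsspace (PySem.Str.slice text (some ((a : Int) + 1)) (some (q : Int))) = true)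
      · rw [if_pos hcond]
        rw [hleft]
        apply ih q _ hpair' hmemf' hmemb'
        · rw [hcast, length_pvFill]; exact hlen
        · intro k hk
          rw [hcast, getD_pvFill b (a + 1) q _ (by omega) k]
          by_cases hka : k ≤ a
          · rw [if_neg (by omega)]
            exact H0 k hka
          · by_cases hkq : k < q
            · rw [if_pos ⟨by omega, hkq⟩]
              rw [hspecgap k (by omega) hkq, if_pos ⟨hqmem.1, by exact_mod_cast hcond.2⟩]
            · have : k = q := by omega
              subst this
              rw [if_neg (by omega), H1 k (by omega), pvSpecAt_styled text st k hqmem.2]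
        · intro k hk
          rw [hcast, getD_pvFill b (a + 1) q _ (by omega) k, if_neg (by omega)]
          exact H1 k (by omega)
      · rw [if_neg hcond]
        apply ih q b hpair' hmemf' hmemb' hlen
        · intro k hk
          by_cases hka : k ≤ a
          · exact H0 k hka
          · by_cases hkq : k < q
            · rw [hspecgap k (by omega) hkq]
              rw [H1 k (by omega), hgapm k (by omega) hkq]
              rcases not_and_or.mp hcond with hc | hc
              · omega
              · rw [if_neg (by tauto)]
            · have : k = q := by omega
              subst this
              rw [H1 k (by omega), pvSpecAt_styled text st k hqmem.2]
        · intro k hk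
          exact H1 k (by omega)

-- ---- B's anchor list ----
theorem enum_filter_map (l : List (Option String)) (s : Int) :
    (((PySem.List.enumerate l s).filter (fun pr => pr.2.isSome)).map (·.1))
      = (((List.range l.length).filter (fun m => (l.getD m none).isSome)).map (fun m : Nat => s + (m : Int))) := by
  induction l generalizing s with
  | nil => simp [PySem.List.enumerate_nil]
  | cons x xs ih =>
      rw [PySem.List.enumerate_cons]
      have hpred : ((fun m => ((x :: xs).getD m none).isSome) ∘ Nat.succ)
          = fun m => (xs.getD m none).isSome := by
        funext m; simp
      by_cases hx : x.isSome
      · simp only [List.length_cons, List.range_succ_eq_map, List.filter_cons, List.getD_cons_zero,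
          List.filter_map, hpred, List.map_map, hx, if_pos, List.map_cons]
        congr 1
        · simp
        rw [ih (s + 1)]
        apply List.map_congr_left
        intro m _
        simp only [Function.comp_apply]
        push_cast
        ring
      · simp only [List.length_cons, List.range_succ_eq_map, List.filter_cons, List.getD_cons_zero,
          List.filter_map, hpred, List.map_map, hx, Bool.false_eq_true, if_neg, not_false_eq_true]
        rw [ih (s + 1)]
        apply List.map_congr_left
        intro m _
        simp only [Function.comp_apply]
        push_cast
        ring

theorem b_eq_spec (text : String) (st : List (Option String)) :
    bridge_unstyled_whitespace_py_alt text st = pvSpecOut text st := by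
  unfold bridge_unstyled_whitespace_py_alt
  simp only []
  rw [enum_filter_map st 0]
  have h0 : (fun m : Nat => (0 : Int) + (m : Int)) = (fun m : Nat => (m : Int)) := by
    funext m; ring
  rw [h0]
  have hmemA : ∀ m, m ∈ (List.range st.length).filter (fun m => (st.getD m none).isSome)
      ↔ (m < st.length ∧ st.getD m none ≠ none) := by
    intro m
    simp [List.mem_filter, List.mem_range, Option.isSome_iff_ne_none]
  have hpairA : ((List.range st.length).filter (fun m => (st.getD m none).isSome)).Pairwise (· < ·) :=
    List.Pairwise.sublist List.filter_sublist List.pairwise_lt_range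
  rcases hA : (List.range st.length).filter (fun m => (st.getD m none).isSome) with _ | ⟨a, rest⟩
  · -- no styled position at all: nothing to bridge
    simp only [List.map_nil, PySem.List.slice_from_one, List.tail_nil, List.zip_nil_right,
      List.foldl_nil]
    apply eq_specOut_of_getD text st st rfl
    intro k hk
    have hknone : st.getD k none = none := by
      by_contra hs
      have := (hmemA k).mpr ⟨hk, hs⟩
      rw [hA] at this
      simp at this
    rw [hknone, pvSpecAt_no_next text st k hknone]
    intro m hm1 hm2
    by_contra hs
    have := (hmemA m).mpr ⟨hm2, hs⟩
    rw [hA] at this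
    simp at this
  · rw [hA] at hmemA hpairA
    rw [PySem.List.slice_from_one, ← List.map_tail, List.zip_map, List.foldl_map]
    have hfun : (fun (b : List (Option String)) (pq : Nat × Nat) =>
          (fun b (pq : Int × Int) =>
            if pq.2 > pq.1 + 1 ∧ PySem.Str.strIsspace (PySem.Str.slice text (some (pq.1 + 1)) (some pq.2)) = true then
              pvFill b (pq.1 + 1) pq.2 (PySem.List.pyGetD b pq.1 none)
            else b) b (Prod.map (fun m : Nat => (m : Int)) (fun m : Nat => (m : Int)) pq))
        = fun (b : List (Option String)) (pq : Nat × Nat) =>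
            if ((pq.2 : Int) > (pq.1 : Int) + 1 ∧ PySem.Str.strIsspace (PySem.Str.slice text (some ((pq.1 : Int) + 1)) (some (pq.2 : Int))) = true) then
              pvFill b ((pq.1 : Int) + 1) (pq.2 : Int) (PySem.List.pyGetD b (pq.1 : Int) none)
            else b := by
      funext b pq
      rfl
    rw [hfun]
    apply foldB_to_spec text st rest a st hpairA
    · intro m hm
      exact (hmemA m).mp hm
    · intro m _ h2 h3
      exact (hmemA m).mpr ⟨h2, h3⟩
    · rfl
    · intro k hk
      rcases Nat.eq_or_lt_of_le hk with rfl | hlt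
      · have := (hmemA k).mp (by simp)
        rw [pvSpecAt_styled text st k this.2]
      · have hknone : st.getD k none = none := by
          by_contra hs
          have hkn : k < st.length := by
            have := (hmemA a).mp (by simp)
            omega
          have hmem := (hmemA k).mpr ⟨hkn, hs⟩
          rcases List.mem_cons.mp hmem with rfl | hmr
          · omega
          · have := (List.pairwise_cons.mp hpairA).1 k hmr
            omega
        rw [hknone, pvSpecAt_no_prev text st k hknone]
        intro m hm
        by_contra hs
        have hmn : m < st.length := by
          have := (hmemA a).mp (by simp)
          omega
        have hmem := (hmemA m).mpr ⟨hmn, hs⟩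
        rcases List.mem_cons.mp hmem with rfl | hmr
        · omega
        · have := (List.pairwise_cons.mp hpairA).1 m hmr
          omega
    · intro k _
      rfl

theorem a_eq_spec (text : String) (st : List (Option String)) :
    bridge_unstyled_whitespace_py text st = pvSpecOut text st := by
  unfold bridge_unstyled_whitespace_py
  exact loopA_to_spec text st st.length 0 st (by omega) rfl (fun _ _ => rfl)
    (by omega) (by omega)

-- ===== VERDICT (by name: the statement is the Claim_ definition above) =====
theorem bridge_unstyled_whitespace_py_spec : Claim_equal_bridge_unstyled_whitespace_py := by
  intro text styles _
  unfold Spec_bridge_unstyled_whitespace_py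
  rw [a_eq_spec, b_eq_spec]
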